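-- pv_equiv track=rewrite | github.com/nickedelenbos/adventofcode2023 | python/day3/part2.py | find_the_number
-- ===== SOURCE A (Python) =====
-- def find_the_number(line: [str], col: int):
--     the_number = line[col]
--
--     # look left
--     for i in range(col - 1, -1, -1):
--         if line[i].isdigit():
--             the_number = line[i] + the_number
--         else:
--             break
--
--     # look right
--     for i in range(col + 1, len(line), 1):
--         if line[i].isdigit():
--             the_number = the_number + line[i]
--         else:
--             break
--
--     return the_number
-- ===== SOURCE B (Python) =====
-- def find_the_number(line: [str], col: int):
--     # find the span boundaries first, then emit the whole run with one slice+join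
--     start = col
--     while start > 0 and line[start - 1].isdigit():
--         start -= 1
--     end = col
--     while end < len(line) - 1 and line[end + 1].isdigit():
--         end += 1
--     return ''.join(line[start:end + 1])
-- ===== Notes on version B (the rewrite author's own statement) =====
-- stated objective: simpler
-- what changed: Instead of concatenating characters onto an accumulator while walking left and right, B first finds the span boundaries (start/end index of the digit run around col) and then returns one slice joined in a single pass.
-- outside the precondition, e.g. on find_the_number(['1', '2', '3'], -1): A returns '3123', B returns '3'
import Mathlib
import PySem

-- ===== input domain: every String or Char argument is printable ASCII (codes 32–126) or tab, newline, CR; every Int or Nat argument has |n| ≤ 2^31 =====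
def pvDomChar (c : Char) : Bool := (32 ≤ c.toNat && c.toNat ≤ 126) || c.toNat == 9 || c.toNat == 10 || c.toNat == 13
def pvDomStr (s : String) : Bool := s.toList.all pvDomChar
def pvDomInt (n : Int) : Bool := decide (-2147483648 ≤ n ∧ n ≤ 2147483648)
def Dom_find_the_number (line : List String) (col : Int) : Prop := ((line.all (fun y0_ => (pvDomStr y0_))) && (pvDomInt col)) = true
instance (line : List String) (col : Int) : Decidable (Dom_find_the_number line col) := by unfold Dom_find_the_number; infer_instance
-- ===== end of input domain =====

-- B finds the boundaries of the digit run around col first and then emits one slice/join,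
-- instead of A's accumulate-while-walking; same cost, simpler shape (objective: simpler).

-- ===== PORT A =====
-- left loop of A: 'for i in range(col-1, -1, -1): if line[i].isdigit(): prepend else break'
def pvALeft (line : List String) : List Int → String → String
  | [], acc => acc
  | i :: rest, acc =>
    if PySem.Str.strIsdigit (PySem.List.pyGetD line i "") then
      pvALeft line rest (PySem.List.pyGetD line i "" ++ acc)
    else acc

-- right loop of A: 'for i in range(col+1, len(line), 1): if line[i].isdigit(): append else break'
def pvARight (line : List String) : List Int → String → String
  | [], acc => acc
  | i :: rest, acc =>
    if PySem.Str.strIsdigit (PySem.List.pyGetD line i "") then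
      pvARight line rest (acc ++ PySem.List.pyGetD line i "")
    else acc

def find_the_number (line : List String) (col : Int) : String :=
  let t0 := PySem.List.pyGetD line col ""   -- line[col]; in range under Pre_
  let t1 := pvALeft line (PySem.List.pyRange (col - 1) (-1) (-1)) t0
  pvARight line (PySem.List.pyRange (col + 1) (line.length : Int) 1) t1

-- ===== PORT B =====
-- 'while start > 0 and line[start-1].isdigit(): start -= 1'; the fuel max(start,0) only bounds
-- the iteration count (start decreases by 1 while positive), the Python guard is tested as written
def pvBStart (line : List String) : Nat → Int → Int
  | 0, s => s
  | fuel + 1, s =>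
    if s > 0 && PySem.Str.strIsdigit (PySem.List.pyGetD line (s - 1) "") then
      pvBStart line fuel (s - 1)
    else s

-- 'while end < len(line)-1 and line[end+1].isdigit(): end += 1'; fuel max(len-1-end,0) bounds
-- the iteration count (end increases by 1 while below len-1), the guard is tested as written
def pvBEnd (line : List String) : Nat → Int → Int
  | 0, e => e
  | fuel + 1, e =>
    if e < (line.length : Int) - 1 && PySem.Str.strIsdigit (PySem.List.pyGetD line (e + 1) "") then
      pvBEnd line fuel (e + 1)
    else e

def find_the_number_alt (line : List String) (col : Int) : String :=
  let start := pvBStart line col.toNat col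
  let stop := pvBEnd line ((line.length : Int) - 1 - col).toNat col
  PySem.Str.join "" (PySem.List.slice line (some start) (some (stop + 1)))

-- ===== PRECONDITION & SPEC =====
-- Pre_ excludes col ≥ len(line) (A raises IndexError) and negative col, where A's value is an
-- accidental corner of Python negative indexing (line[col] wraps to the end while the right scan
-- restarts from index col+1 counted from the front) that no caller of this grid helper specifies.
def Pre_find_the_number (line : List String) (col : Int) : Prop := 0 ≤ col ∧ col < line.length
instance (line : List String) (col : Int) : Decidable (Pre_find_the_number line col) := by unfold Pre_find_the_number; infer_instance

def pvWitness_find_the_number : List String × Int := (["*", "1", "2"], 1)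

def Spec_find_the_number (line : List String) (col : Int) (out : String) : Prop := out = find_the_number_alt line col
instance (line : List String) (col : Int) (out : String) : Decidable (Spec_find_the_number line col out) := by unfold Spec_find_the_number; infer_instance

-- ===== CLAIM (what is proved, stated in full; the proofs are below) =====
def Claim_equal_find_the_number : Prop := ∀ (line : List String) (col : Int), Dom_find_the_number line col → Pre_find_the_number line col → Spec_find_the_number line col (find_the_number line col)

-- ===== LEMMAS AND PROOFS =====

-- proof-only Nat-indexed versions of B's two while loops (used only under Pre_, where col = c ≥ 0)
def pvBStartN (line : List String) : Nat → Nat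
  | 0 => 0
  | s + 1 => if PySem.Str.strIsdigit (line.getD s "") then pvBStartN line s else s + 1

def pvBEndN (line : List String) : Nat → Nat → Nat
  | 0, e => e
  | fuel + 1, e => if PySem.Str.strIsdigit (line.getD (e + 1) "") then pvBEndN line fuel (e + 1) else e

theorem pvBStart_eq_natCast (line : List String) (c : Nat) :
    pvBStart line c (c : Int) = ((pvBStartN line c : Nat) : Int) := by
  induction c with
  | zero => simp [pvBStart, pvBStartN]
  | succ k ih =>
      have h1 : ((k + 1 : Nat) : Int) > 0 := by omega
      have h2 : ((k + 1 : Nat) : Int) - 1 = (k : Int) := by push_cast; ring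
      simp only [pvBStart, pvBStartN, h2, PySem.List.pyGetD_natCast,
        decide_eq_true h1, Bool.true_and]
      by_cases h : PySem.Str.strIsdigit (line.getD k "") = true
      · rw [if_pos h, if_pos h]; exact ih
      · rw [if_neg h, if_neg h]

theorem pvBEnd_eq_natCast (line : List String) (fuel : Nat) :
    ∀ (e : Nat), fuel = line.length - 1 - e → e ≤ line.length - 1 →
    pvBEnd line fuel (e : Int) = ((pvBEndN line fuel e : Nat) : Int) := by
  induction fuel with
  | zero => intro e _ _; simp [pvBEnd, pvBEndN]
  | succ f ih =>
      intro e hf he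
      have hlt : (e : Int) < (line.length : Int) - 1 := by omega
      have h2 : (e : Int) + 1 = ((e + 1 : Nat) : Int) := by push_cast; ring
      simp only [pvBEnd, pvBEndN, h2, PySem.List.pyGetD_natCast,
        decide_eq_true hlt, Bool.true_and]
      by_cases h : PySem.Str.strIsdigit (line.getD (e + 1) "") = true
      · rw [if_pos h, if_pos h]; exact ih (e + 1) (by omega) (by omega)
      · rw [if_neg h, if_neg h]


-- join with empty separator: the three algebraic facts the assembly needs
theorem joinE_nil : PySem.Str.join "" [] = "" := by
  apply String.toList_inj.mp
  simp [PySem.Str.toList_join, PySem.Chars.join_nil]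

theorem joinE_cons (x : String) (xs : List String) :
    PySem.Str.join "" (x :: xs) = x ++ PySem.Str.join "" xs := by
  apply String.toList_inj.mp
  cases xs with
  | nil => simp [PySem.Str.toList_join, PySem.Chars.join_singleton, PySem.Chars.join_nil]
  | cons y ys =>
      simp [PySem.Str.toList_join, PySem.Chars.join_cons_cons]

theorem joinE_append (xs ys : List String) :
    PySem.Str.join "" (xs ++ ys) = PySem.Str.join "" xs ++ PySem.Str.join "" ys := by
  induction xs with
  | nil => simp [joinE_nil]
  | cons x xs ih => simp [joinE_cons, ih, String.append_assoc]

-- a digit-test succeeding on line.getD k "" forces k in range ("".isdigit() is False)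
theorem digit_getD_lt (line : List String) (k : Nat)
    (h : PySem.Str.strIsdigit (line.getD k "") = true) : k < line.length := by
  by_contra hk
  rw [Nat.not_lt] at hk
  rw [List.getD_eq_default _ _ hk] at h
  exact absurd h (by decide)

theorem pvBStartN_le (line : List String) (c : Nat) : pvBStartN line c ≤ c := by
  induction c with
  | zero => simp [pvBStartN]
  | succ k ih =>
      simp only [pvBStartN]
      split
      · omega
      · omega

theorem le_pvBEndN (line : List String) (fuel e : Nat) : e ≤ pvBEndN line fuel e := by
  induction fuel generalizing e with
  | zero => simp [pvBEndN]
  | succ f ih =>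
      simp only [pvBEndN]
      split
      · exact le_trans (by omega) (ih (e + 1))
      · exact le_refl e

-- A's left loop builds exactly the join of the slice from pvBStartN to c
theorem aLeft_eq (line : List String) (c : Nat) (acc : String) :
    pvALeft line (PySem.List.pyRange ((c : Int) - 1) (-1) (-1)) acc
      = PySem.Str.join "" ((line.drop (pvBStartN line c)).take (c - pvBStartN line c)) ++ acc := by
  induction c generalizing acc with
  | zero =>
      rw [show (((0 : Nat) : Int) - 1) = -1 by simp,
          PySem.List.pyRange_neg_one_eq_nil (by omega)]
      simp [pvALeft, pvBStartN, joinE_nil]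
  | succ k ih =>
      rw [show ((k + 1 : Nat) : Int) - 1 = (k : Int) by push_cast; ring,
          PySem.List.pyRange_neg_one_cons (by omega)]
      simp only [pvALeft, PySem.List.pyGetD_natCast]
      by_cases h : PySem.Str.strIsdigit (line.getD k "") = true
      · have hk : k < line.length := digit_getD_lt line k h
        have hs : pvBStartN line (k + 1) = pvBStartN line k := by
          simp only [pvBStartN]; rw [if_pos h]
        have hsk : pvBStartN line k ≤ k := pvBStartN_le line k
        rw [if_pos h, ih]
        rw [hs]
        have htake : (line.drop (pvBStartN line k)).take (k + 1 - pvBStartN line k)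
            = (line.drop (pvBStartN line k)).take (k - pvBStartN line k) ++ [line.getD k ""] := by
          have h1 : k + 1 - pvBStartN line k = (k - pvBStartN line k) + 1 := by omega
          rw [h1, List.take_add_one]
          congr 1
          rw [List.getElem?_drop]
          have h2 : pvBStartN line k + (k - pvBStartN line k) = k := by omega
          rw [h2, List.getElem?_eq_getElem hk, List.getD_eq_getElem line "" hk]
          rfl
        rw [htake, joinE_append, joinE_cons, joinE_nil, String.append_assoc]
        simp
      · rw [if_neg h]
        have hs : pvBStartN line (k + 1) = k + 1 := by
          simp only [pvBStartN]; rw [if_neg h]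
        rw [hs]
        simp [joinE_nil]

-- A's right loop appends exactly the join of the slice from c+1 to pvBEndN
theorem aRight_eq (line : List String) (fuel : Nat) :
    ∀ (c : Nat) (acc : String), fuel = line.length - 1 - c →
    pvARight line (PySem.List.pyRange ((c : Int) + 1) (line.length : Int) 1) acc
      = acc ++ PySem.Str.join "" ((line.drop (c + 1)).take (pvBEndN line fuel c - c)) := by
  induction fuel with
  | zero =>
      intro c acc hf
      rw [PySem.List.pyRange_one_eq_nil (by omega)]
      simp [pvARight, pvBEndN, joinE_nil]
  | succ f ih =>
      intro c acc hf
      have hc1 : (c : Int) + 1 < (line.length : Int) := by omega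
      rw [PySem.List.pyRange_one_cons hc1]
      simp only [pvARight]
      rw [show ((c : Int) + 1) = ((c + 1 : Nat) : Int) by push_cast; ring]
      simp only [PySem.List.pyGetD_natCast]
      by_cases h : PySem.Str.strIsdigit (line.getD (c + 1) "") = true
      · rw [if_pos h]
        have he : pvBEndN line (f + 1) c = pvBEndN line f (c + 1) := by
          simp only [pvBEndN]; rw [if_pos h]
        have hle : c + 1 ≤ pvBEndN line f (c + 1) := le_pvBEndN line f (c + 1)
        have hlen : c + 1 < line.length := digit_getD_lt line (c + 1) h
        rw [ih (c + 1) (acc ++ line.getD (c + 1) "") (by omega), he]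
        have hdrop : line.drop (c + 1) = line.getD (c + 1) "" :: line.drop (c + 2) := by
          rw [List.drop_eq_getElem_cons hlen, List.getD_eq_getElem line "" hlen]
        have h1 : pvBEndN line f (c + 1) - c = (pvBEndN line f (c + 1) - (c + 1)) + 1 := by omega
        rw [hdrop, h1, List.take_succ_cons, joinE_cons, String.append_assoc]
      · rw [if_neg h]
        have he : pvBEndN line (f + 1) c = c := by
          simp only [pvBEndN]; rw [if_neg h]
        rw [he]
        simp [joinE_nil]

-- the slice from pvBStartN to pvBEndN+1 decomposes as left-run ++ middle ++ right-run
theorem slice_decomp (line : List String) (c : Nat) (hc : c < line.length) :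
    (line.drop (pvBStartN line c)).take (pvBEndN line (line.length - 1 - c) c + 1 - pvBStartN line c)
      = (line.drop (pvBStartN line c)).take (c - pvBStartN line c)
        ++ line.getD c "" :: (line.drop (c + 1)).take (pvBEndN line (line.length - 1 - c) c - c) := by
  set s := pvBStartN line c with hs
  set e := pvBEndN line (line.length - 1 - c) c with he
  have hsc : s ≤ c := pvBStartN_le line c
  have hce : c ≤ e := le_pvBEndN line _ c
  have h1 : e + 1 - s = (c - s) + (e + 1 - c) := by omega
  rw [h1, List.take_add, List.drop_drop]
  congr 1
  have h2 : s + (c - s) = c := by omega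
  rw [h2, List.drop_eq_getElem_cons hc, List.getD_eq_getElem line "" hc]
  have h3 : e + 1 - c = (e - c) + 1 := by omega
  rw [h3, List.take_succ_cons]

-- ===== VERDICT (by name: the statement is the Claim_ definition above) =====
theorem find_the_number_spec : Claim_equal_find_the_number := by
  intro line col _hdom hpre
  obtain ⟨h0, hlt⟩ := hpre
  unfold Spec_find_the_number find_the_number find_the_number_alt
  set c := col.toNat with hc
  have hcol : col = (c : Int) := by omega
  have hclen : c < line.length := by omega
  rw [hcol]
  simp only []
  have hfuel : ((line.length : Int) - 1 - (c : Int)).toNat = line.length - 1 - c := by omega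
  rw [hfuel, pvBStart_eq_natCast line c,
      pvBEnd_eq_natCast line (line.length - 1 - c) c rfl (by omega)]
  rw [aLeft_eq line c, aRight_eq line (line.length - 1 - c) c _ rfl]
  rw [PySem.List.pyGetD_natCast]
  rw [show ((pvBEndN line (line.length - 1 - c) c : Nat) : Int) + 1
        = ((pvBEndN line (line.length - 1 - c) c + 1 : Nat) : Int) by push_cast; ring,
      PySem.List.slice_natCast]
  rw [slice_decomp line c hclen, joinE_append, joinE_cons, String.append_assoc]
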